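-- pv_equiv track=rewrite | github.com/SviatlanaYakimtsava/Python_test | Task3.py | normstring
-- ===== SOURCE A (Python) =====
-- def normstring (string_def):
--     flag = False
--     # normalizing string from letter case point of view
--     for i in range(len(string_def)):
--         if flag and string_def[i].isalpha():
--             string_def = string_def[:i] + string_def[i].swapcase() + string_def[i + 1:]
--             flag = False
--         if string_def[i] in ['.', '\n', '\t']:
--             flag = True
--     return string_def
-- ===== SOURCE B (Python) =====
-- def normstring(string_def):
--     # Run-oriented rewrite: walk maximal alpha / non-alpha runs, arming a flag
--     # from delimiters seen in a non-alpha run and swapcasing the first letter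
--     # of the following alpha run.
--     out = []
--     armed = False
--     i = 0
--     n = len(string_def)
--     while i < n:
--         j = i
--         if string_def[i].isalpha():
--             while j < n and string_def[j].isalpha():
--                 j += 1
--             run = string_def[i:j]
--             if armed:
--                 run = run[0].swapcase() + run[1:]
--                 armed = False
--             out.append(run)
--         else:
--             while j < n and not string_def[j].isalpha():
--                 j += 1
--             run = string_def[i:j]
--             armed = any(ch in '.\n\t' for ch in run)
--             out.append(run)
--         i = j
--     return ''.join(out)
-- ===== Notes on version B (the rewrite author's own statement) =====
-- stated objective: alternative
-- what changed: Replaces A's index-by-index scan that rebuilds the whole string by slicing at every swapped character with a single walk over maximal alpha/non-alpha runs that arms a flag from delimiters in a non-alpha run and swapcases the first letter of the next alpha run, joining the runs at the end.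
import Mathlib
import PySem

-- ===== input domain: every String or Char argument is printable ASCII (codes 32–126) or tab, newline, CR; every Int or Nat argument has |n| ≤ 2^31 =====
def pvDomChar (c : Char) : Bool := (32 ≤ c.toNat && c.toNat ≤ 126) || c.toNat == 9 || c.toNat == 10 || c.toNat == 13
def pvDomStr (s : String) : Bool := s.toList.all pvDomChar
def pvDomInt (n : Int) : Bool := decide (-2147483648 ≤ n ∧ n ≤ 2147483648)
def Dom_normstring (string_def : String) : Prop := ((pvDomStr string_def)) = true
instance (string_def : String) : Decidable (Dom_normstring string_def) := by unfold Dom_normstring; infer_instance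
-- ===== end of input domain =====

-- B rewrites A's character-indexed, string-rebuilding scan as a single left-to-right
-- walk over maximal alpha/non-alpha runs (objective: alternative decomposition).


-- ===== PORT A =====
-- the list literal ['.', '\n', '\t'] of A's membership test
def delimsA : List Char := ['.', '\n', '\t']

-- str.swapcase() on a single character (exact on ASCII)
def swapcaseChar (c : Char) : Char :=
  if PySem.Chars.islower c then PySem.Chars.upperChar c
  else if PySem.Chars.isupper c then PySem.Chars.lowerChar c
  else c

-- one iteration of A's `for i in range(len(string_def))` loop; the `.getD`
-- defaults are never taken: 0 ≤ i < len and the string's length is invariant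
def normstringBody (st : List Char × Bool) (i : Int) : List Char × Bool :=
  let s := st.1
  let flag := st.2
  let (s, flag) :=
    if flag && ((PySem.List.pyGet? s i).map PySem.Chars.isalpha).getD false then
      (PySem.List.slice s none (some i)
         ++ [swapcaseChar ((PySem.List.pyGet? s i).getD ' ')]
         ++ PySem.List.slice s (some (i + 1)) none,
       false)
    else (s, flag)
  let flag := if ((PySem.List.pyGet? s i).getD ' ') ∈ delimsA then true else flag
  (s, flag)

def normstring (string_def : String) : String :=
  String.ofList
    ((PySem.List.pyRange 0 (PySem.Str.len string_def)).foldl normstringBody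
      (string_def.toList, false)).1

-- ===== PORT B =====
-- B's while-loop over maximal runs, as the obvious structural recursion:
-- each step consumes one maximal alpha or non-alpha run of the remaining string
def normstringAltGo : Bool → List Char → List Char
  | _, [] => []
  | armed, c :: cs =>
    if PySem.Chars.isalpha c then
      (if armed then swapcaseChar c else c) :: cs.takeWhile PySem.Chars.isalpha
        ++ normstringAltGo false (cs.dropWhile PySem.Chars.isalpha)
    else
      c :: cs.takeWhile (fun d => !PySem.Chars.isalpha d)
        ++ normstringAltGo
             ((c :: cs.takeWhile (fun d => !PySem.Chars.isalpha d)).any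
               (fun d => decide (d ∈ delimsA)))
             (cs.dropWhile (fun d => !PySem.Chars.isalpha d))
termination_by _ s => s.length
decreasing_by
  · exact Nat.lt_succ_of_le (List.length_dropWhile_le _ _)
  · exact Nat.lt_succ_of_le (List.length_dropWhile_le _ _)

def normstring_alt (string_def : String) : String :=
  String.ofList (normstringAltGo false string_def.toList)

-- ===== PRECONDITION & SPEC =====
def Spec_normstring (string_def : String) (out : String) : Prop := out = normstring_alt string_def
instance (string_def : String) (out : String) : Decidable (Spec_normstring string_def out) := by unfold Spec_normstring; infer_instance

-- ===== CLAIM (what is proved, stated in full; the proofs are below) =====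
def Claim_equal_normstring : Prop := ∀ (string_def : String), Dom_normstring string_def → Spec_normstring string_def (normstring string_def)

-- ===== LEMMAS AND PROOFS =====

-- canonical one-character step: flag-guarded swapcase, then the delimiter test
-- on the (possibly swapped) character
def coreStep (f : Bool) (c : Char) : Char × Bool :=
  let p := if f && PySem.Chars.isalpha c then (swapcaseChar c, false) else (c, f)
  (p.1, if p.1 ∈ delimsA then true else p.2)

def coreRun : Bool → List Char → List Char × Bool
  | f, [] => ([], f)
  | f, c :: cs =>
    let p := coreStep f c
    let r := coreRun p.2 cs
    (p.1 :: r.1, r.2)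

lemma islower_toNat {c : Char} (h : PySem.Chars.islower c = true) :
    97 ≤ c.toNat ∧ c.toNat ≤ 122 := by
  simp [PySem.Chars.islower, Char.le_def] at h
  exact ⟨UInt32.le_iff_toNat_le.mp h.1, UInt32.le_iff_toNat_le.mp h.2⟩

lemma isupper_toNat {c : Char} (h : PySem.Chars.isupper c = true) :
    65 ≤ c.toNat ∧ c.toNat ≤ 90 := by
  simp [PySem.Chars.isupper, Char.le_def] at h
  exact ⟨UInt32.le_iff_toNat_le.mp h.1, UInt32.le_iff_toNat_le.mp h.2⟩

lemma alpha_not_delim {c : Char} (h : PySem.Chars.isalpha c = true) :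
    c ∉ delimsA := by
  intro hm
  simp [delimsA] at hm
  rcases hm with rfl | rfl | rfl <;> exact absurd h (by decide)

lemma swap_toNat_lower {c : Char} (hl : PySem.Chars.islower c = true) :
    (swapcaseChar c).toNat = c.toNat - 32 := by
  have hb := islower_toNat hl
  unfold swapcaseChar
  rw [if_pos hl]
  unfold PySem.Chars.upperChar
  rw [if_pos hl, Char.toNat_ofNat, if_pos (Or.inl (by omega))]

lemma swap_toNat_upper {c : Char} (hu : PySem.Chars.isupper c = true)
    (hnl : PySem.Chars.islower c = false) :
    (swapcaseChar c).toNat = c.toNat + 32 := by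
  have hb := isupper_toNat hu
  unfold swapcaseChar
  rw [if_neg (by simp [hnl]), if_pos hu]
  unfold PySem.Chars.lowerChar
  rw [if_pos hu, Char.toNat_ofNat, if_pos (Or.inl (by omega))]

lemma swap_not_delim {c : Char} (h : PySem.Chars.isalpha c = true) :
    swapcaseChar c ∉ delimsA := by
  intro hm
  have htn : (swapcaseChar c).toNat = 46 ∨ (swapcaseChar c).toNat = 10 ∨
      (swapcaseChar c).toNat = 9 := by
    simp [delimsA] at hm
    rcases hm with h1 | h1 | h1 <;> rw [h1]
    · exact Or.inl rfl
    · exact Or.inr (Or.inl rfl)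
    · exact Or.inr (Or.inr rfl)
  by_cases hl : PySem.Chars.islower c = true
  · have hb := islower_toNat hl
    rw [swap_toNat_lower hl] at htn
    rcases htn with h1 | h1 | h1 <;> omega
  · have hu : PySem.Chars.isupper c = true := by
      simp [PySem.Chars.isalpha, hl] at h
      exact h
    have hb := isupper_toNat hu
    rw [swap_toNat_upper hu (Bool.eq_false_iff.mpr hl)] at htn
    rcases htn with h1 | h1 | h1 <;> omega

lemma coreRun_append (xs ys : List Char) (f : Bool) :
    coreRun f (xs ++ ys) =
      ((coreRun f xs).1 ++ (coreRun (coreRun f xs).2 ys).1,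
       (coreRun (coreRun f xs).2 ys).2) := by
  induction xs generalizing f with
  | nil => rfl
  | cons c cs ih => simp only [List.cons_append, coreRun, ih]

lemma coreRun_alpha_false (xs : List Char)
    (h : ∀ x ∈ xs, PySem.Chars.isalpha x = true) :
    coreRun false xs = (xs, false) := by
  induction xs with
  | nil => rfl
  | cons c cs ih =>
    have hc := h c (by simp)
    have hnd : c ∉ delimsA := alpha_not_delim hc
    simp [coreRun, coreStep, hnd, ih (fun x hx => h x (by simp [hx]))]

lemma coreRun_nonalpha (xs : List Char) (f : Bool)
    (h : ∀ x ∈ xs, PySem.Chars.isalpha x = false) :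
    coreRun f xs = (xs, f || xs.any (fun d => decide (d ∈ delimsA))) := by
  induction xs generalizing f with
  | nil => simp [coreRun]
  | cons c cs ih =>
    have hc := h c (by simp)
    have hstep : coreStep f c = (c, f || decide (c ∈ delimsA)) := by
      unfold coreStep
      rw [hc]
      simp only [Bool.and_false, Bool.false_eq_true, if_false]
      by_cases hd : c ∈ delimsA <;> simp [hd]
    rw [show coreRun f (c :: cs) =
        ((coreStep f c).1 :: (coreRun (coreStep f c).2 cs).1,
         (coreRun (coreStep f c).2 cs).2) from rfl]
    rw [hstep, ih _ (fun x hx => h x (by simp [hx]))]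
    simp only [List.any_cons]
    cases f <;> by_cases hd : c ∈ delimsA <;> simp [hd]

lemma head?_dropWhile_not {p : Char → Bool} (l : List Char) :
    ∀ c, (l.dropWhile p).head? = some c → p c = false := by
  induction l with
  | nil => intro c hc; simp at hc
  | cons x xs ih =>
    intro c hc
    by_cases hx : p x
    · rw [List.dropWhile_cons_of_pos hx] at hc
      exact ih c hc
    · rw [List.dropWhile_cons_of_neg hx] at hc
      simp at hc
      subst hc
      exact Bool.eq_false_iff.mpr hx

lemma altGo_eq (n : Nat) : ∀ (s : List Char), s.length ≤ n → ∀ f : Bool,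
    (f = true → ∀ c, s.head? = some c → PySem.Chars.isalpha c = true) →
    normstringAltGo f s = (coreRun f s).1 := by
  induction n with
  | zero =>
    intro s hs f _
    have : s = [] := List.eq_nil_of_length_eq_zero (Nat.le_zero.mp hs)
    subst this
    simp [normstringAltGo, coreRun]
  | succ n ih =>
    intro s hs f hf
    match s with
    | [] => simp [normstringAltGo, coreRun]
    | c :: cs =>
      by_cases hc : PySem.Chars.isalpha c
      · -- alpha run
        rw [normstringAltGo, if_pos hc]
        have hsplit : cs = cs.takeWhile PySem.Chars.isalpha ++ cs.dropWhile PySem.Chars.isalpha :=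
          (List.takeWhile_append_dropWhile).symm
        have hflag : coreStep f c = (if f then swapcaseChar c else c, false) := by
          cases f with
          | false => simp [coreStep, alpha_not_delim hc]
          | true => simp [coreStep, hc, swap_not_delim hc]
        conv_rhs => rw [show (c :: cs) = c :: (cs.takeWhile PySem.Chars.isalpha ++ cs.dropWhile PySem.Chars.isalpha) from by rw [← hsplit]]
        simp only [coreRun, hflag]
        rw [coreRun_append, coreRun_alpha_false _ (fun x hx => List.mem_takeWhile_imp hx)]
        have hlen : (cs.dropWhile PySem.Chars.isalpha).length ≤ n :=
          le_trans (List.length_dropWhile_le _ _) (by simpa using Nat.lt_succ_iff.mp (Nat.lt_of_lt_of_le (by simp) hs))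
        rw [ih _ hlen false (by intro h; exact absurd h (by simp))]
        simp
      · -- non-alpha run
        have hf0 : f = false := by
          cases f with
          | false => rfl
          | true => exact absurd (hf rfl c rfl) (by simp [hc])
        subst hf0
        rw [normstringAltGo, if_neg hc]
        have hsplit : cs = cs.takeWhile (fun d => !PySem.Chars.isalpha d) ++ cs.dropWhile (fun d => !PySem.Chars.isalpha d) :=
          (List.takeWhile_append_dropWhile).symm
        conv_rhs => rw [show (c :: cs) = (c :: cs.takeWhile (fun d => !PySem.Chars.isalpha d)) ++ cs.dropWhile (fun d => !PySem.Chars.isalpha d) from by rw [List.cons_append, ← hsplit]]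
        rw [coreRun_append]
        have hna : ∀ x ∈ (c :: cs.takeWhile (fun d => !PySem.Chars.isalpha d)), PySem.Chars.isalpha x = false := by
          intro x hx
          rcases List.mem_cons.mp hx with rfl | hx'
          · exact Bool.eq_false_iff.mpr hc
          · have := List.mem_takeWhile_imp hx'
            simpa using this
        rw [coreRun_nonalpha _ _ hna]
        have hlen : (cs.dropWhile (fun d => !PySem.Chars.isalpha d)).length ≤ n :=
          le_trans (List.length_dropWhile_le _ _) (by simpa using Nat.lt_succ_iff.mp (Nat.lt_of_lt_of_le (by simp) hs))
        rw [ih _ hlen _ ?_]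
        · simp
        · intro _ d hd
          have := head?_dropWhile_not (p := fun d => !PySem.Chars.isalpha d) cs d hd
          simpa using this

-- A's indexed loop, run from position done.length, rewrites exactly the suffix
lemma loopA : ∀ (rest done : List Char) (f : Bool),
    (PySem.List.pyRange (done.length : Int) (((done ++ rest).length : Nat) : Int)).foldl
        normstringBody (done ++ rest, f)
      = (done ++ (coreRun f rest).1, (coreRun f rest).2) := by
  intro rest
  induction rest with
  | nil =>
    intro done f
    have : PySem.List.pyRange (done.length : Int) (((done ++ []).length : Nat) : Int) = [] := by
      simp [PySem.List.pyRange]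
    rw [this]
    simp [coreRun]
  | cons c cs ih =>
    intro done f
    have hlt : (done.length : Int) < (((done ++ c :: cs).length : Nat) : Int) := by
      simp
    rw [PySem.List.pyRange_one_cons hlt]
    rw [List.foldl_cons]
    have hbody : normstringBody (done ++ c :: cs, f) (done.length : Int)
        = ((done ++ [(coreStep f c).1]) ++ cs, (coreStep f c).2) := by
      have h1 : PySem.List.slice (done ++ c :: cs) none (some (done.length : Int)) = done := by
        rw [PySem.List.slice_to_natCast]
        exact List.take_left
      have h2 : PySem.List.slice (done ++ c :: cs) (some ((done.length : Int) + 1)) none = cs := by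
        have he : (done.length : Int) + 1 = ((done.length + 1 : Nat) : Int) := by push_cast; ring
        rw [he, PySem.List.slice_from_natCast]
        rw [show done.length + 1 = (done ++ [c]).length by simp]
        rw [show done ++ c :: cs = (done ++ [c]) ++ cs by simp]
        exact List.drop_left
      by_cases hswap : (f && PySem.Chars.isalpha c) = true
      · have hstep : coreStep f c =
            (swapcaseChar c, if swapcaseChar c ∈ delimsA then true else false) := by
          unfold coreStep
          rw [if_pos hswap]
        have h3 : PySem.List.pyGet? (done ++ [swapcaseChar c] ++ cs) (done.length : Int)
            = some (swapcaseChar c) := by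
          rw [show done ++ [swapcaseChar c] ++ cs = done ++ swapcaseChar c :: cs by simp]
          exact PySem.List.pyGet?_append_length _ _ _
        rw [hstep]
        unfold normstringBody
        simp only [PySem.List.pyGet?_append_length, Option.map_some, Option.getD_some,
          hswap, if_true, h1, h2, h3]
      · have hswap' : (f && PySem.Chars.isalpha c) = false := by
          exact Bool.eq_false_iff.mpr hswap
        have hstep : coreStep f c = (c, if c ∈ delimsA then true else f) := by
          unfold coreStep
          rw [if_neg (by simp [hswap'])]
        rw [hstep]
        unfold normstringBody
        simp only [PySem.List.pyGet?_append_length, Option.map_some, Option.getD_some, hswap',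
          Bool.false_eq_true, if_false]
        simp
    rw [hbody]
    have hlen : ((done ++ c :: cs).length : Nat) = ((done ++ [(coreStep f c).1]) ++ cs).length := by simp
    have := ih (done ++ [(coreStep f c).1]) (coreStep f c).2
    rw [show ((done ++ [(coreStep f c).1]).length : Int) = (done.length : Int) + 1 by simp] at this
    rw [hlen, this]
    simp [coreRun]

lemma normstring_eq_core (s : String) :
    normstring s = String.ofList (coreRun false s.toList).1 := by
  unfold normstring
  have := loopA s.toList [] false
  simp only [List.nil_append, List.length_nil, Int.natCast_zero] at this
  rw [show PySem.Str.len s = ((s.toList.length : Nat) : Int) from by simp [PySem.Str.len_eq]]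
  rw [this]

lemma normstring_alt_eq_core (s : String) :
    normstring_alt s = String.ofList (coreRun false s.toList).1 := by
  unfold normstring_alt
  rw [altGo_eq s.toList.length s.toList (le_refl _) false (by intro h; exact absurd h (by simp))]

-- ===== VERDICT (by name: the statement is the Claim_ definition above) =====
theorem normstring_spec : Claim_equal_normstring := by
  intro s _
  unfold Spec_normstring
  rw [normstring_eq_core, normstring_alt_eq_core]
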